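-- pv_equiv track=rewrite | github.com/gercoweststeijn/adventsofcode2023 | 013/main.py | horizontal_col_to_left
-- ===== SOURCE A (Python) =====
-- def horizontal_col_to_left (rows, fs):
--
--
--     # we only inspect the top row - reflection must be on all rows
--     row = rows[0]
--
--     # left side
--     half_row_len = round (int((len(row)/2)))
--
--     for left in range(half_row_len):
--         right = left+1
--
--         #if (left+1)*2 > len(row):
--         #    ref_length = int(len(row))-(left+1)
--         #else:
--         ref_length = left+1
--
--         left_part = row[0:right]
--         right_part_str = row[right:right+ref_length]
--         right_part = right_part_str[::-1]
--
--         #print (f'compare L0,{right}: {left_part} R{right},{right+ref_length}: {right_part}')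
--         if right_part == left_part:
--             # search for more rows with this
--             no_counter_example = True
--             for row in rows:
--                 left_part = row[0:right]
--                 right_part_str = row[right:right+ref_length]
--                 right_part = right_part_str[::-1]
--
--                 if right_part != left_part:
--                     no_counter_example = False
--                     break
--                 #print (f'gevonden bij left:  {left}')
--             if no_counter_example and (fs!=left+1 or fs is None) :
--                 return left +1
--     #print ('------------------------')
--     # second half
--     for left in range(half_row_len, len(row)):
--         right = left+1
--
--         ref_length = int(len(row))-(right)
--         if ref_length > 0:
--             left_part = row[(left-(ref_length))+1:right]
--             right_part_str = row[right:right+ref_length]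
--             right_part = right_part_str[::-1]
--
--             #print (f'compare L{(left-(ref_length))+1},{right}: {left_part} R{right},{right+ref_length}: {right_part}')
--
--             if left_part == right_part:
--                 # search for more rows with this
--                 no_counter_example = True
--                 for row in rows:
--                     left_part = row[(left-(ref_length))+1:right]
--                     right_part_str = row[right:right+ref_length]
--                     right_part = right_part_str[::-1]
--
--                     if  left_part != right_part:
--                         no_counter_example = False
--                         break
--                     #print (f'gevonden bij left:  {left}')
--                 if no_counter_example and (fs!=left+1 or fs is None):
--                     return left +1
--     return 0
-- ===== SOURCE B (Python) =====
-- def _reflects(row, r):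
--     m = min(r, len(row) - r)
--     return row[r:r+m] == row[r-m:r][::-1]
--
-- def horizontal_col_to_left(rows, fs):
--     # collect the candidate reflection lines of the first row once,
--     # then prune the surviving candidates with every later row
--     cand = [r for r in range(1, len(rows[0])) if _reflects(rows[0], r)]
--     for row in rows[1:]:
--         cand = [r for r in cand if _reflects(row, r)]
--     for r in cand:
--         if r != fs:
--             return r
--     return 0
-- ===== Notes on version B (the rewrite author's own statement) =====
-- stated objective: alternative
-- what changed: A scans reflection lines in two half-range loops, re-testing a candidate on one (accidentally shadowed) row and then re-verifying every row with duplicated slice code; B computes the first row's valid reflection lines once with a single min-window palindrome test and prunes that candidate list with each remaining row, returning the smallest survivor different from fs.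
-- outside the precondition, e.g. on horizontal_col_to_left(['ccbb', ' '], None): A returns 0, B returns 1
import Mathlib
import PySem

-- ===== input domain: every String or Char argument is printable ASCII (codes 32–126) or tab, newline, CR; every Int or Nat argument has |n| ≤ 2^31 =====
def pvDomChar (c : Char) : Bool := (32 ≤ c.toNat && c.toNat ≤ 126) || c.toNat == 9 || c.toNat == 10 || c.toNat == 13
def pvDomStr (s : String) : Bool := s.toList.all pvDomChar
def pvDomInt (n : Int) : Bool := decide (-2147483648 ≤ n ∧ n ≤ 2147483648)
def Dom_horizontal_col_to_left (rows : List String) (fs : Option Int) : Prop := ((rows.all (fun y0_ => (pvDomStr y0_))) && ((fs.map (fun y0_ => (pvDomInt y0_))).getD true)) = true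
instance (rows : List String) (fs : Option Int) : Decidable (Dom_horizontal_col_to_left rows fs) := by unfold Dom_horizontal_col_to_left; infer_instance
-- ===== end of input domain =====

-- B replaces A's two candidate-then-verify half-range scans by a single candidate-list pruning pass
-- across the rows (objective: alternative, not claimed faster).

-- ===== PORT A =====
-- the comparison of A's first loop: row[0:right] vs row[right:right+ref][::-1]
-- ([::-1] is List.reverse, PySem.List.slice?_none_none_neg_one)
def pvA_cmp1 (row : List Char) (right ref : Int) : Bool :=
  let left_part := PySem.List.slice row (some 0) (some right)
  let right_part := (PySem.List.slice row (some right) (some (right + ref))).reverse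
  right_part == left_part

-- `for row in rows: ... if right_part != left_part: break` of the first loop; the loop variable
-- `row` shadows the enclosing one, so the pair carries the final value of `row` as well
def pvA_inner1 (right ref : Int) : List Char → List (List Char) → Bool × List Char
  | row, [] => (true, row)
  | _, r :: rs => if !(pvA_cmp1 r right ref) then (false, r) else pvA_inner1 right ref r rs

-- `for left in range(half_row_len): ...` with its early return; second component = current `row`
def pvA_loop1 (rows : List (List Char)) (fs : Option Int) : List Int → List Char → Option Int × List Char
  | [], row => (none, row)
  | left :: rest, row =>
    if pvA_cmp1 row (left + 1) (left + 1) then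
      let res := pvA_inner1 (left + 1) (left + 1) row rows
      if res.1 && ((fs != some (left + 1)) || (fs == none)) then (some (left + 1), res.2)
      else pvA_loop1 rows fs rest res.2
    else pvA_loop1 rows fs rest row

-- the comparison of A's second loop: row[(left-ref)+1:right] vs row[right:right+ref][::-1]
def pvA_cmp2 (row : List Char) (left right ref : Int) : Bool :=
  let left_part := PySem.List.slice row (some (left - ref + 1)) (some right)
  let right_part := (PySem.List.slice row (some right) (some (right + ref))).reverse
  left_part == right_part

def pvA_inner2 (left right ref : Int) : List Char → List (List Char) → Bool × List Char
  | row, [] => (true, row)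
  | _, r :: rs => if !(pvA_cmp2 r left right ref) then (false, r) else pvA_inner2 left right ref r rs

-- `for left in range(half_row_len, len(row)): ...`; ref_length is recomputed from the CURRENT
-- (possibly shadowed) `row` at every iteration, exactly as in the Python
def pvA_loop2 (rows : List (List Char)) (fs : Option Int) : List Int → List Char → Option Int × List Char
  | [], row => (none, row)
  | left :: rest, row =>
    let ref := PySem.List.len row - (left + 1)
    if ref > 0 then
      if pvA_cmp2 row left (left + 1) ref then
        let res := pvA_inner2 left (left + 1) ref row rows
        if res.1 && ((fs != some (left + 1)) || (fs == none)) then (some (left + 1), res.2)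
        else pvA_loop2 rows fs rest res.2
      else pvA_loop2 rows fs rest row
    else pvA_loop2 rows fs rest row

def horizontal_col_to_left (rows : List String) (fs : Option Int) : Int :=
  match rows with
  | [] => 0  -- Python raises IndexError at rows[0]; excluded by Pre_
  | r0 :: _ =>
    let rsl := rows.map String.toList
    let row0 := r0.toList
    -- half_row_len = round(int(len(row)/2)) = len(row) // 2 (exact: len/2 is an exact float here)
    let half : Int := PySem.Int.floordiv (PySem.List.len row0) 2
    match pvA_loop1 rsl fs (PySem.List.pyRange 0 half) row0 with
    | (some v, _) => v
    | (none, row1) =>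
      match pvA_loop2 rsl fs (PySem.List.pyRange half (PySem.List.len row1)) row1 with
      | (some v, _) => v
      | (none, _) => 0

-- ===== PORT B =====
-- _reflects(row, r): min-window palindrome test at line r
def pvB_reflects (row : List Char) (r : Int) : Bool :=
  let m := min r (PySem.List.len row - r)
  PySem.List.slice row (some r) (some (r + m)) == (PySem.List.slice row (some (r - m)) (some r)).reverse

-- `for r in cand: if r != fs: return r` / `return 0`
def pvB_first (fs : Option Int) : List Int → Int
  | [] => 0
  | r :: rest => if some r != fs then r else pvB_first fs rest

def horizontal_col_to_left_alt (rows : List String) (fs : Option Int) : Int :=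
  match rows with
  | [] => 0  -- Python B raises IndexError at rows[0]; excluded by Pre_
  | r0 :: rest =>
    let row0 := r0.toList
    let cand0 := (PySem.List.pyRange 1 (PySem.List.len row0)).filter (fun r => pvB_reflects row0 r)
    let cand := rest.foldl (fun c row => c.filter (fun r => pvB_reflects row.toList r)) cand0
    pvB_first fs cand

-- ===== PRECONDITION & SPEC =====
-- Pre_ excludes empty input (rows[0] raises IndexError) and ragged (non-rectangular) inputs whose
-- first row has at least 2 characters: there A's inner loops shadow the variable `row`, so the
-- second-phase window widths depend on whichever row the scan last touched — an accidental,
-- path-dependent value no caller would specify; ragged inputs whose first row has ≤ 1 character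
-- are still admitted (no reflection line fits there and both versions return 0).
def Pre_horizontal_col_to_left (rows : List String) (fs : Option Int) : Prop :=
  rows ≠ [] ∧ ((rows.headD "").toList.length ≤ 1 ∨ ∀ s ∈ rows, s.toList.length = (rows.headD "").toList.length)
instance (rows : List String) (fs : Option Int) : Decidable (Pre_horizontal_col_to_left rows fs) := by
  unfold Pre_horizontal_col_to_left; infer_instance

def pvWitness_horizontal_col_to_left : List String × Option Int := (["#..#", "####"], some 1)

def Spec_horizontal_col_to_left (rows : List String) (fs : Option Int) (out : Int) : Prop := out = horizontal_col_to_left_alt rows fs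
instance (rows : List String) (fs : Option Int) (out : Int) : Decidable (Spec_horizontal_col_to_left rows fs out) := by unfold Spec_horizontal_col_to_left; infer_instance

-- ===== CLAIM (what is proved, stated in full; the proofs are below) =====
def Claim_equal_horizontal_col_to_left : Prop := ∀ (rows : List String) (fs : Option Int), Dom_horizontal_col_to_left rows fs → Pre_horizontal_col_to_left rows fs → Spec_horizontal_col_to_left rows fs (horizontal_col_to_left rows fs)

-- ===== LEMMAS AND PROOFS =====

-- the common value both programs compute on rectangular input: the first line l+1 (l drawn from
-- the given list) that reflects on every row and differs from fs
def pvScan (rsl : List (List Char)) (fs : Option Int) : List Int → Option Int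
  | [] => none
  | l :: rest =>
    if rsl.all (fun row => pvB_reflects row (l + 1)) && !(fs == some (l + 1)) then some (l + 1)
    else pvScan rsl fs rest

theorem pv_rev_beq (xs ys : List Char) : (xs.reverse == ys) = (xs == ys.reverse) := by
  by_cases h : xs = ys.reverse
  · subst h; simp
  · have h2 : xs.reverse ≠ ys := by
      intro hh; exact h (List.reverse_eq_iff.mp hh)
    simp [h, h2]

theorem pv_beq_rev' (xs ys : List Char) : (xs == ys.reverse) = (ys == xs.reverse) := by
  by_cases h : xs = ys.reverse
  · subst h
    simp
  · have h2 : ys ≠ xs.reverse := by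
      intro hh; exact h (by rw [hh, List.reverse_reverse])
    simp [h, h2]

theorem pv_fscondA (fs : Option Int) (v : Int) :
    ((fs != some v) || (fs == none)) = !(fs == some v) := by
  cases fs with
  | none => simp
  | some w =>
    by_cases h : w = v
    · subst h; simp
    · have h1 : (some w != some v) = true := by simp [h]
      have h2 : (some w == some v) = false := by simp [h]
      have h3 : (some w == (none : Option Int)) = false := by simp
      rw [h1, h2, h3, Bool.not_false, Bool.true_or]

theorem pv_fscondB (fs : Option Int) (v : Int) :
    (some v != fs) = !(fs == some v) := by
  cases fs with
  | none => simp
  | some w =>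
    by_cases h : v = w
    · subst h; simp
    · have h1 : (some v != some w) = true := by simp [h]
      have h2 : (some w == some v) = false := by simp [Ne.symm h]
      rw [h1, h2, Bool.not_false]

theorem pv_neq_true {b : Bool} (h : b = false) : ¬ (b = true) := by simp [h]

theorem pv_all_congr_mem {α : Type} (xs : List α) (f g : α → Bool)
    (h : ∀ x ∈ xs, f x = g x) : xs.all f = xs.all g := by
  induction xs with
  | nil => rfl
  | cons x xs ih =>
    simp only [List.all_cons]
    rw [h x (List.mem_cons_self), ih (fun y hy => h y (List.mem_cons_of_mem _ hy))]

-- the two comparison formulas agree with B's min-window test on rows of the right length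
theorem pv_cmp1_eq (row : List Char) (W : Nat) (hW : row.length = W) (l : Int)
    (h1 : l + 1 ≤ ((W / 2 : Nat) : Int)) :
    pvA_cmp1 row (l + 1) (l + 1) = pvB_reflects row (l + 1) := by
  have hdm : ((W / 2 : Nat) : Int) * 2 ≤ (W : Int) := by
    exact_mod_cast Nat.div_mul_le_self W 2
  have hm : min (l + 1) (PySem.List.len row - (l + 1)) = l + 1 := by
    rw [PySem.List.len_eq, hW]
    exact min_eq_left (by omega)
  simp only [pvA_cmp1, pvB_reflects]
  rw [hm]
  have hz : l + 1 - (l + 1) = (0 : Int) := by ring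
  rw [hz]
  exact pv_rev_beq _ _

theorem pv_cmp2_eq (row : List Char) (W : Nat) (hW : row.length = W) (l : Int)
    (hlow : ((W / 2 : Nat) : Int) ≤ l) (_hhi : l + 1 < (W : Int)) :
    pvA_cmp2 row l (l + 1) ((W : Int) - (l + 1)) = pvB_reflects row (l + 1) := by
  have hdm : (W : Int) ≤ ((W / 2 : Nat) : Int) * 2 + 1 := by
    have h1 := Nat.div_add_mod W 2
    have h2 : W % 2 < 2 := Nat.mod_lt _ (by norm_num)
    omega
  have hm : min (l + 1) (PySem.List.len row - (l + 1)) = (W : Int) - (l + 1) := by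
    rw [PySem.List.len_eq, hW]
    exact min_eq_right (by omega)
  simp only [pvA_cmp2, pvB_reflects]
  rw [hm]
  have ha : l - ((W : Int) - (l + 1)) + 1 = l + 1 - ((W : Int) - (l + 1)) := by ring
  rw [ha]
  exact pv_beq_rev' _ _

-- inner loops: first component = "no row is a counterexample", second = final loop variable
theorem pv_inner1_fst (right ref : Int) :
    ∀ (rs : List (List Char)) (row : List Char),
      (pvA_inner1 right ref row rs).1 = rs.all (fun r => pvA_cmp1 r right ref) := by
  intro rs
  induction rs with
  | nil => intro row; rfl
  | cons r rs ih =>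
    intro row
    by_cases h : pvA_cmp1 r right ref <;> simp [pvA_inner1, h, ih]

theorem pv_inner1_snd (right ref : Int) :
    ∀ (rs : List (List Char)) (row : List Char),
      (pvA_inner1 right ref row rs).2 = row ∨ (pvA_inner1 right ref row rs).2 ∈ rs := by
  intro rs
  induction rs with
  | nil => intro row; exact Or.inl rfl
  | cons r rs ih =>
    intro row
    by_cases h : pvA_cmp1 r right ref
    · have hstep : pvA_inner1 right ref row (r :: rs) = pvA_inner1 right ref r rs := by
        simp [pvA_inner1, h]
      rw [hstep]
      rcases ih r with h2 | h2
      · exact Or.inr (by rw [h2]; exact List.mem_cons_self ..)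
      · exact Or.inr (List.mem_cons_of_mem _ h2)
    · have hstep : pvA_inner1 right ref row (r :: rs) = (false, r) := by
        simp [pvA_inner1, h]
      rw [hstep]
      exact Or.inr (List.mem_cons_self ..)

theorem pv_inner2_fst (left right ref : Int) :
    ∀ (rs : List (List Char)) (row : List Char),
      (pvA_inner2 left right ref row rs).1 = rs.all (fun r => pvA_cmp2 r left right ref) := by
  intro rs
  induction rs with
  | nil => intro row; rfl
  | cons r rs ih =>
    intro row
    by_cases h : pvA_cmp2 r left right ref <;> simp [pvA_inner2, h, ih]

theorem pv_inner2_snd (left right ref : Int) :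
    ∀ (rs : List (List Char)) (row : List Char),
      (pvA_inner2 left right ref row rs).2 = row ∨ (pvA_inner2 left right ref row rs).2 ∈ rs := by
  intro rs
  induction rs with
  | nil => intro row; exact Or.inl rfl
  | cons r rs ih =>
    intro row
    by_cases h : pvA_cmp2 r left right ref
    · have hstep : pvA_inner2 left right ref row (r :: rs) = pvA_inner2 left right ref r rs := by
        simp [pvA_inner2, h]
      rw [hstep]
      rcases ih r with h2 | h2
      · exact Or.inr (by rw [h2]; exact List.mem_cons_self ..)
      · exact Or.inr (List.mem_cons_of_mem _ h2)
    · have hstep : pvA_inner2 left right ref row (r :: rs) = (false, r) := by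
        simp [pvA_inner2, h]
      rw [hstep]
      exact Or.inr (List.mem_cons_self ..)

-- one-step unfolding equations, used to drive the loop proofs
theorem pvScan_cons (rsl : List (List Char)) (fs : Option Int) (l : Int) (rest : List Int) :
    pvScan rsl fs (l :: rest) =
      if rsl.all (fun row => pvB_reflects row (l + 1)) && !(fs == some (l + 1)) then some (l + 1)
      else pvScan rsl fs rest := rfl

theorem pvA_loop1_cons (rows : List (List Char)) (fs : Option Int) (l : Int) (rest : List Int)
    (row : List Char) :
    pvA_loop1 rows fs (l :: rest) row =
      if pvA_cmp1 row (l + 1) (l + 1) then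
        if (pvA_inner1 (l + 1) (l + 1) row rows).1 && ((fs != some (l + 1)) || (fs == none)) then
          (some (l + 1), (pvA_inner1 (l + 1) (l + 1) row rows).2)
        else pvA_loop1 rows fs rest (pvA_inner1 (l + 1) (l + 1) row rows).2
      else pvA_loop1 rows fs rest row := rfl

theorem pvA_loop2_cons (rows : List (List Char)) (fs : Option Int) (l : Int) (rest : List Int)
    (row : List Char) :
    pvA_loop2 rows fs (l :: rest) row =
      if PySem.List.len row - (l + 1) > 0 then
        if pvA_cmp2 row l (l + 1) (PySem.List.len row - (l + 1)) then
          if (pvA_inner2 l (l + 1) (PySem.List.len row - (l + 1)) row rows).1 &&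
              ((fs != some (l + 1)) || (fs == none)) then
            (some (l + 1), (pvA_inner2 l (l + 1) (PySem.List.len row - (l + 1)) row rows).2)
          else pvA_loop2 rows fs rest (pvA_inner2 l (l + 1) (PySem.List.len row - (l + 1)) row rows).2
        else pvA_loop2 rows fs rest row
      else pvA_loop2 rows fs rest row := rfl

theorem pvB_first_cons (fs : Option Int) (r : Int) (rest : List Int) :
    pvB_first fs (r :: rest) = if some r != fs then r else pvB_first fs rest := rfl

-- loop 1 on rectangular input computes pvScan over its index list
theorem pv_loop1_spec (rsl : List (List Char)) (fs : Option Int) (W : Nat)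
    (hlen : ∀ x ∈ rsl, x.length = W) :
    ∀ (lefts : List Int) (row : List Char), row ∈ rsl →
      (∀ l ∈ lefts, l + 1 ≤ ((W / 2 : Nat) : Int)) →
      (pvA_loop1 rsl fs lefts row).1 = pvScan rsl fs lefts ∧
      (pvA_loop1 rsl fs lefts row).2 ∈ rsl := by
  intro lefts
  induction lefts with
  | nil => intro row hrow _; exact ⟨rfl, hrow⟩
  | cons l rest ih =>
    intro row hrow hcond
    have h1 : l + 1 ≤ ((W / 2 : Nat) : Int) := hcond l (List.mem_cons_self ..)
    have hrest : ∀ l' ∈ rest, l' + 1 ≤ ((W / 2 : Nat) : Int) :=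
      fun l' h => hcond l' (List.mem_cons_of_mem _ h)
    have hall : (rsl.all fun x => pvA_cmp1 x (l + 1) (l + 1)) =
        rsl.all fun x => pvB_reflects x (l + 1) :=
      pv_all_congr_mem _ _ _ (fun x hx => pv_cmp1_eq x W (hlen x hx) l h1)
    have hsnd : (pvA_inner1 (l + 1) (l + 1) row rsl).2 ∈ rsl := by
      rcases pv_inner1_snd (l + 1) (l + 1) rsl row with h | h
      · rw [h]; exact hrow
      · exact h
    rw [pvA_loop1_cons, pvScan_cons]
    by_cases hb : (rsl.all fun x => pvB_reflects x (l + 1)) = true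
    · have houter : pvA_cmp1 row (l + 1) (l + 1) = true := by
        rw [pv_cmp1_eq row W (hlen row hrow) l h1]
        exact List.all_eq_true.mp hb row hrow
      have hfst : (pvA_inner1 (l + 1) (l + 1) row rsl).1 = true := by
        rw [pv_inner1_fst, hall]; exact hb
      by_cases hfs : (fs == some (l + 1)) = true
      · have hca : ((pvA_inner1 (l + 1) (l + 1) row rsl).1 &&
            ((fs != some (l + 1)) || (fs == none))) = false := by
          rw [hfst, pv_fscondA, hfs]; rfl
        have hcs : ((rsl.all fun row => pvB_reflects row (l + 1)) && !(fs == some (l + 1))) = false := by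
          rw [hb, hfs]; rfl
        rw [if_pos houter, if_neg (pv_neq_true hca), if_neg (pv_neq_true hcs)]
        exact ih _ hsnd hrest
      · rw [Bool.not_eq_true] at hfs
        have hca : ((pvA_inner1 (l + 1) (l + 1) row rsl).1 &&
            ((fs != some (l + 1)) || (fs == none))) = true := by
          rw [hfst, pv_fscondA, hfs]; rfl
        have hcs : ((rsl.all fun row => pvB_reflects row (l + 1)) && !(fs == some (l + 1))) = true := by
          rw [hb, hfs]; rfl
        rw [if_pos houter, if_pos hca, if_pos hcs]
        exact ⟨rfl, hsnd⟩
    · rw [Bool.not_eq_true] at hb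
      have hcs : ((rsl.all fun row => pvB_reflects row (l + 1)) && !(fs == some (l + 1))) = false := by
        rw [hb]; rfl
      rw [if_neg (pv_neq_true hcs)]
      by_cases houter : pvA_cmp1 row (l + 1) (l + 1) = true
      · have hfst : (pvA_inner1 (l + 1) (l + 1) row rsl).1 = false := by
          rw [pv_inner1_fst, hall]; exact hb
        have hca : ((pvA_inner1 (l + 1) (l + 1) row rsl).1 &&
            ((fs != some (l + 1)) || (fs == none))) = false := by
          rw [hfst]; rfl
        rw [if_pos houter, if_neg (pv_neq_true hca)]
        exact ih _ hsnd hrest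
      · rw [if_neg houter]
        exact ih _ hrow hrest

-- loop 2 on rectangular input: the iterations with ref_length ≤ 0 are skipped
theorem pv_loop2_spec (rsl : List (List Char)) (fs : Option Int) (W : Nat)
    (hlen : ∀ x ∈ rsl, x.length = W) :
    ∀ (lefts : List Int) (row : List Char), row ∈ rsl →
      (∀ l ∈ lefts, ((W / 2 : Nat) : Int) ≤ l) →
      (pvA_loop2 rsl fs lefts row).1 =
        pvScan rsl fs (lefts.filter (fun l => decide (l + 1 < (W : Int)))) := by
  intro lefts
  induction lefts with
  | nil => intro row hrow _; rfl
  | cons l rest ih =>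
    intro row hrow hcond
    have h1 : ((W / 2 : Nat) : Int) ≤ l := hcond l (List.mem_cons_self ..)
    have hrest : ∀ l' ∈ rest, ((W / 2 : Nat) : Int) ≤ l' :=
      fun l' h => hcond l' (List.mem_cons_of_mem _ h)
    have hrowW : PySem.List.len row = (W : Int) := by
      rw [PySem.List.len_eq, hlen row hrow]
    rw [pvA_loop2_cons]
    by_cases href : l + 1 < (W : Int)
    · have hgt : PySem.List.len row - (l + 1) > 0 := by rw [hrowW]; omega
      have hfilter : (l :: rest).filter (fun l => decide (l + 1 < (W : Int))) =
          l :: rest.filter (fun l => decide (l + 1 < (W : Int))) := by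
        simp [href]
      rw [hfilter, pvScan_cons, if_pos hgt]
      have hall : (rsl.all fun x => pvA_cmp2 x l (l + 1) (PySem.List.len row - (l + 1))) =
          rsl.all fun x => pvB_reflects x (l + 1) := by
        rw [hrowW]
        exact pv_all_congr_mem _ _ _ (fun x hx => pv_cmp2_eq x W (hlen x hx) l h1 href)
      have hsnd : (pvA_inner2 l (l + 1) (PySem.List.len row - (l + 1)) row rsl).2 ∈ rsl := by
        rcases pv_inner2_snd l (l + 1) (PySem.List.len row - (l + 1)) rsl row with h | h
        · rw [h]; exact hrow
        · exact h
      by_cases hb : (rsl.all fun x => pvB_reflects x (l + 1)) = true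
      · have houter : pvA_cmp2 row l (l + 1) (PySem.List.len row - (l + 1)) = true := by
          rw [hrowW, pv_cmp2_eq row W (hlen row hrow) l h1 href]
          exact List.all_eq_true.mp hb row hrow
        have hfst : (pvA_inner2 l (l + 1) (PySem.List.len row - (l + 1)) row rsl).1 = true := by
          rw [pv_inner2_fst, hall]; exact hb
        by_cases hfs : (fs == some (l + 1)) = true
        · have hca : ((pvA_inner2 l (l + 1) (PySem.List.len row - (l + 1)) row rsl).1 &&
              ((fs != some (l + 1)) || (fs == none))) = false := by
            rw [hfst, pv_fscondA, hfs]; rfl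
          have hcs : ((rsl.all fun row => pvB_reflects row (l + 1)) && !(fs == some (l + 1))) = false := by
            rw [hb, hfs]; rfl
          rw [if_pos houter, if_neg (pv_neq_true hca), if_neg (pv_neq_true hcs)]
          exact ih _ hsnd hrest
        · rw [Bool.not_eq_true] at hfs
          have hca : ((pvA_inner2 l (l + 1) (PySem.List.len row - (l + 1)) row rsl).1 &&
              ((fs != some (l + 1)) || (fs == none))) = true := by
            rw [hfst, pv_fscondA, hfs]; rfl
          have hcs : ((rsl.all fun row => pvB_reflects row (l + 1)) && !(fs == some (l + 1))) = true := by
            rw [hb, hfs]; rfl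
          rw [if_pos houter, if_pos hca, if_pos hcs]
      · rw [Bool.not_eq_true] at hb
        have hcs : ((rsl.all fun row => pvB_reflects row (l + 1)) && !(fs == some (l + 1))) = false := by
          rw [hb]; rfl
        rw [if_neg (pv_neq_true hcs)]
        by_cases houter : pvA_cmp2 row l (l + 1) (PySem.List.len row - (l + 1)) = true
        · have hfst : (pvA_inner2 l (l + 1) (PySem.List.len row - (l + 1)) row rsl).1 = false := by
            rw [pv_inner2_fst, hall]; exact hb
          have hca : ((pvA_inner2 l (l + 1) (PySem.List.len row - (l + 1)) row rsl).1 &&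
              ((fs != some (l + 1)) || (fs == none))) = false := by
            rw [hfst]; rfl
          rw [if_pos houter, if_neg (pv_neq_true hca)]
          exact ih _ hsnd hrest
        · rw [if_neg houter]
          exact ih _ hrow hrest
    · have hskip : ¬ (PySem.List.len row - (l + 1) > 0) := by rw [hrowW]; omega
      have hfilter : (l :: rest).filter (fun l => decide (l + 1 < (W : Int))) =
          rest.filter (fun l => decide (l + 1 < (W : Int))) := by
        simp [href]
      rw [hfilter, if_neg hskip]
      exact ih _ hrow hrest

theorem pv_scan_append (rsl : List (List Char)) (fs : Option Int) :
    ∀ xs ys : List Int, pvScan rsl fs (xs ++ ys) = (pvScan rsl fs xs).or (pvScan rsl fs ys) := by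
  intro xs ys
  induction xs with
  | nil => simp [pvScan]
  | cons x xs ih =>
    rw [List.cons_append, pvScan_cons, pvScan_cons]
    by_cases h : (rsl.all (fun row => pvB_reflects row (x + 1)) && !(fs == some (x + 1))) = true
    · rw [if_pos h, if_pos h]
      rfl
    · rw [if_neg h, if_neg h, ih]

theorem pv_range_singleton (b : Int) : PySem.List.pyRange (b - 1) b = [b - 1] := by
  rw [PySem.List.pyRange_one]
  have : (b - (b - 1)).toNat = 1 := by omega
  rw [this]
  simp

theorem pv_filter_range (a b : Int) (hab : a ≤ b - 1) :
    (PySem.List.pyRange a b).filter (fun l => decide (l + 1 < b)) =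
      PySem.List.pyRange a (b - 1) := by
  rw [PySem.List.pyRange_one_append a (b - 1) b hab (by omega), List.filter_append]
  have h1 : (PySem.List.pyRange a (b - 1)).filter (fun l => decide (l + 1 < b)) =
      PySem.List.pyRange a (b - 1) := by
    rw [List.filter_eq_self]
    intro x hx
    have := PySem.List.mem_pyRange_one.mp hx
    simp; omega
  have h2 : (PySem.List.pyRange (b - 1) b).filter (fun l => decide (l + 1 < b)) = [] := by
    rw [pv_range_singleton]
    simp
  rw [h1, h2, List.append_nil]

-- B's fold of filters = one filter by "every remaining row reflects"
theorem pv_foldl_filter (rest : List String) :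
    ∀ c : List Int,
      rest.foldl (fun c row => c.filter (fun r => pvB_reflects row.toList r)) c =
        c.filter (fun r => rest.all (fun row => pvB_reflects row.toList r)) := by
  induction rest with
  | nil => intro c; simp
  | cons s rest ih =>
    intro c
    simp only [List.foldl_cons]
    rw [ih, List.filter_filter]
    apply List.filter_congr
    intro x _
    simp [Bool.and_comm]

-- B's final scan over the pruned candidates = pvScan over the corresponding left-list
theorem pv_first_scan (rsl : List (List Char)) (fs : Option Int) :
    ∀ lefts : List Int,
      pvB_first fs ((lefts.map (fun l => l + 1)).filter
          (fun r => rsl.all (fun row => pvB_reflects row r))) =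
        (pvScan rsl fs lefts).getD 0 := by
  intro lefts
  induction lefts with
  | nil => rfl
  | cons l rest ih =>
    rw [List.map_cons, List.filter_cons, pvScan_cons]
    by_cases hP : (rsl.all (fun row => pvB_reflects row (l + 1))) = true
    · rw [if_pos hP, pvB_first_cons, pv_fscondB]
      by_cases hfs : (fs == some (l + 1)) = true
      · have hcs : ((rsl.all fun row => pvB_reflects row (l + 1)) && !(fs == some (l + 1))) = false := by
          rw [hP, hfs]; rfl
        have hnb : ¬ ((!(fs == some (l + 1))) = true) := by rw [hfs]; simp
        rw [if_neg hnb, if_neg (pv_neq_true hcs)]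
        exact ih
      · rw [Bool.not_eq_true] at hfs
        have hcs : ((rsl.all fun row => pvB_reflects row (l + 1)) && !(fs == some (l + 1))) = true := by
          rw [hP, hfs]; rfl
        have hb : ((!(fs == some (l + 1))) = true) := by rw [hfs]; rfl
        rw [if_pos hb, if_pos hcs]
        rfl
    · rw [Bool.not_eq_true] at hP
      have hcs : ((rsl.all fun row => pvB_reflects row (l + 1)) && !(fs == some (l + 1))) = false := by
        rw [hP]; rfl
      rw [if_neg (by simp [hP]), if_neg (pv_neq_true hcs)]
      exact ih

theorem pv_range_shift (W : Nat) :
    PySem.List.pyRange 1 (W : Int) =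
      (PySem.List.pyRange 0 ((W : Int) - 1)).map (fun l => l + 1) := by
  rw [PySem.List.pyRange_one, PySem.List.pyRange_one, List.map_map]
  have : ((W : Int) - 1).toNat = ((W : Int) - 1 - 0).toNat := by omega
  rw [← this]
  apply List.map_congr_left
  intro k _
  simp [Function.comp]
  omega

-- ===== VERDICT (by name: the statement is the Claim_ definition above) =====
theorem pv_half_facts (W : Nat) : ((W / 2 : Nat) : Int) * 2 ≤ (W : Int) ∧ (W : Int) ≤ ((W / 2 : Nat) : Int) * 2 + 1 := by
  have h1 := Nat.div_add_mod W 2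
  have h2 : W % 2 < 2 := Nat.mod_lt _ (by norm_num)
  omega

theorem horizontal_col_to_left_spec : Claim_equal_horizontal_col_to_left := by
  intro rows fs _ hpre
  unfold Spec_horizontal_col_to_left
  obtain ⟨hne, hdisj⟩ := hpre
  cases rows with
  | nil => exact absurd rfl hne
  | cons r0 rest =>
    simp only [List.headD_cons] at hdisj
    simp only [horizontal_col_to_left, horizontal_col_to_left_alt]
    -- B side: collapse the fold of filters into one filter over all rows
    rw [pv_foldl_filter, List.filter_filter]
    have hpred : ∀ r ∈ PySem.List.pyRange 1 (PySem.List.len r0.toList),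
        (rest.all (fun row => pvB_reflects row.toList r) && pvB_reflects r0.toList r) =
          ((r0 :: rest).map String.toList).all (fun row => pvB_reflects row r) := by
      intro r _
      rw [List.map_cons, List.all_cons, List.all_map]
      simp only [Function.comp_def]
      exact Bool.and_comm _ _
    rw [List.filter_congr hpred]
    by_cases hW1 : r0.toList.length ≤ 1
    · -- degenerate first row (length 0 or 1): both sides return 0
      rcases Nat.le_one_iff_eq_zero_or_eq_one.mp hW1 with hW | hW
      · have hlen0 : PySem.List.len r0.toList = (0 : Int) := by
          rw [PySem.List.len_eq, hW]; rfl
        have hfd : PySem.Int.floordiv 0 2 = 0 := by decide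
        have hrg : PySem.List.pyRange 0 0 = ([] : List Int) := by decide
        have hrg1 : PySem.List.pyRange 1 0 = ([] : List Int) := by decide
        have e1 : pvA_loop1 ((r0 :: rest).map String.toList) fs [] r0.toList = (none, r0.toList) := rfl
        rw [hlen0, hfd, hrg, hrg1]
        simp only [e1]
        rw [hlen0, hrg]
        rfl
      · have hlen1 : PySem.List.len r0.toList = (1 : Int) := by
          rw [PySem.List.len_eq, hW]; rfl
        have hfd : PySem.Int.floordiv 1 2 = 0 := by decide
        have hrg : PySem.List.pyRange 0 0 = ([] : List Int) := by decide
        have hrg1 : PySem.List.pyRange 1 1 = ([] : List Int) := by decide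
        have e1 : pvA_loop1 ((r0 :: rest).map String.toList) fs [] r0.toList = (none, r0.toList) := rfl
        rw [hlen1, hfd, hrg, hrg1]
        simp only [e1]
        have hrg01 : PySem.List.pyRange 0 1 = ([0] : List Int) := by decide
        rw [hlen1, hrg01, pvA_loop2_cons]
        have hskip : ¬ (PySem.List.len r0.toList - (0 + 1) > 0) := by rw [hlen1]; omega
        rw [if_neg hskip]
        have e2 : pvA_loop2 ((r0 :: rest).map String.toList) fs [] r0.toList = (none, r0.toList) := rfl
        simp only [e2]
        rfl
    · -- rectangular case
      have hrect : ∀ s ∈ r0 :: rest, s.toList.length = r0.toList.length := by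
        rcases hdisj with h | h
        · exact absurd h hW1
        · exact h
      set rsl := (r0 :: rest).map String.toList with hrsl
      set W := r0.toList.length with hWdef
      have hlen : ∀ x ∈ rsl, x.length = W := by
        intro x hx
        rw [hrsl] at hx
        obtain ⟨s, hs, rfl⟩ := List.mem_map.mp hx
        exact hrect s hs
      have hlen0 : PySem.List.len r0.toList = ((W : Nat) : Int) := PySem.List.len_eq _
      have hhalf : PySem.Int.floordiv (PySem.List.len r0.toList) 2 = ((W / 2 : Nat) : Int) := by
        rw [hlen0]
        exact_mod_cast PySem.Int.floordiv_natCast W 2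
      obtain ⟨hdm1, hdm2⟩ := pv_half_facts W
      have hWge : 1 ≤ W := by omega
      have hhab : ((W / 2 : Nat) : Int) ≤ (W : Int) - 1 := by omega
      rw [hhalf, hlen0]
      have hmem0 : r0.toList ∈ rsl := by
        rw [hrsl]; exact List.mem_map_of_mem (List.mem_cons_self ..)
      have hl1 := pv_loop1_spec rsl fs W hlen (PySem.List.pyRange 0 ((W / 2 : Nat) : Int)) r0.toList
        hmem0 (by
          intro l hl
          have := PySem.List.mem_pyRange_one.mp hl
          omega)
      -- B side final scan
      have hB : pvB_first fs ((PySem.List.pyRange 1 ((W : Nat) : Int)).filter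
          (fun r => rsl.all (fun row => pvB_reflects row r))) =
          (pvScan rsl fs (PySem.List.pyRange 0 ((W : Int) - 1))).getD 0 := by
        rw [pv_range_shift W]
        exact pv_first_scan rsl fs (PySem.List.pyRange 0 ((W : Int) - 1))
      rw [hB]
      have hsplit : PySem.List.pyRange 0 ((W : Int) - 1) =
          PySem.List.pyRange 0 ((W / 2 : Nat) : Int) ++
            PySem.List.pyRange ((W / 2 : Nat) : Int) ((W : Int) - 1) :=
        PySem.List.pyRange_one_append _ _ _ (by omega) hhab
      rw [hsplit, pv_scan_append]
      obtain ⟨hf1, hm1⟩ := hl1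
      cases hloop1 : pvA_loop1 rsl fs (PySem.List.pyRange 0 ((W / 2 : Nat) : Int)) r0.toList with
      | mk o1 row1 =>
        rw [hloop1] at hf1 hm1
        simp only at hf1 hm1
        cases o1 with
        | some v =>
          rw [← hf1]
          rfl
        | none =>
          rw [← hf1]
          simp only [Option.none_or]
          have hrow1W : PySem.List.len row1 = ((W : Nat) : Int) := by
            rw [PySem.List.len_eq, hlen row1 hm1]
          rw [hrow1W]
          have hl2 := pv_loop2_spec rsl fs W hlen (PySem.List.pyRange ((W / 2 : Nat) : Int) ((W : Nat) : Int)) row1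
            hm1 (by
              intro l hl
              have := PySem.List.mem_pyRange_one.mp hl
              omega)
          rw [pv_filter_range _ _ hhab] at hl2
          cases hloop2 : pvA_loop2 rsl fs (PySem.List.pyRange ((W / 2 : Nat) : Int) ((W : Nat) : Int)) row1 with
          | mk o2 row2 =>
            rw [hloop2] at hl2
            simp only at hl2
            rw [← hl2]
            cases o2 <;> rfl
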